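/- GENERATED by farm/mkstatement.py from design/units.tsv (unit `start_decoder.R14e`) and the assertions of Vorbis/Spec/StartDecoderR14.lean — do not edit.
   THE STATEMENT of the proof unit `start_decoder.R14e`: segment R14e of `start_decoder` (19 instructions; entries 0x1165d5;
   exits 0x115f67,0x1165f4,0x116616,0x116641; ranges 0x1165d5-0x1165f2 + 0x116606-0x116614 + 0x116628-0x11663f + 0x116653-0x116657)
   takes each of its entry assertions to one of its exit assertions (`Vorbis.Spec.StartDecoder.SegR14e`), given the contracts of its callees.
   What the names mean: Vorbis/Spec/Basic.lean (the shared hypotheses), Vorbis/Spec/StartDecoderR14.lean (the assertions). The theorem to prove: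
   `theorem start_decoder_R14e_ok : Vorbis.Spec.start_decoder_R14e.Statement`. -/
import Vorbis.Spec.StartDecoderR14
namespace Vorbis.Spec.start_decoder_R14e
open X86 X86.User Asan

/-- The statement of unit `start_decoder.R14e`. -/
def Statement : Prop :=
  ∀ (Lay : Layout) (_hLay : Lay.hi = 0x1000000) (μ : Microarch) (_hμ : UserX.MicroOK μ) (u₀ : State)
    (_hcode : HasCodeNat Lay u₀ Vorbis.L.start_decoder.entry Vorbis.Code.code_start_decoder.nat Vorbis.L.start_decoder.size)
    (_h_asan_store1_noabort : Asan.SmallCheck Lay μ Vorbis.WayInv (Vorbis.CodeOK u₀) [.rax, .rdx] 1 Vorbis.L.__asan_store1_noabort.entry)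
    (_h_asan_load2_noabort : Asan.SmallCheck Lay μ Vorbis.WayInv (Vorbis.CodeOK u₀) [.rax, .rcx, .rdx] 2 Vorbis.L.__asan_load2_noabort.entry)
    (_h_asan_load4_noabort : Asan.SmallCheck Lay μ Vorbis.WayInv (Vorbis.CodeOK u₀) [.rax, .rcx, .rdx] 4 Vorbis.L.__asan_load4_noabort.entry),
    Vorbis.Spec.StartDecoder.SegR14e Lay μ u₀

end Vorbis.Spec.start_decoder_R14e
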